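-- pv_equiv track=rewrite | github.com/rezagn/RebelWayML | Week01/week1_assignment_answered.py | findMostCommonPrefix
-- ===== SOURCE A (Python) =====
-- def findMostCommonPrefix(arr):
--     prefixes = {}                           # Empry dictionary to count the prefixes
--     for word in arr:                        # Iterate on the words in the list
--         length = len(word)                  # Get the length of the word
--         for i in range(length, 1, -1):      # Iterate backwards from len of word to 1
--             prefix = word[0:i]              # Get the prefix chars from 0 to i
--             if prefix in prefixes.keys():   # If prefix already exist in keys
--                 prefixes[prefix] += 1       #     Increase the prefix count by 1
--             else:                           # If it doesn't exist in the keys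
--                 prefixes[prefix] = 1        #     Add key with value of 1
--
--     winner = max(prefixes.values())         # Find the maximum occurance count
--     for key, value in prefixes.items():     # Iterate on Key, Values of the dict
--         if value == winner:                 # If the count is maximum
--             return key                      # Return the prefix
-- ===== SOURCE B (Python) =====
-- def findMostCommonPrefix(arr):
--     # The count of a prefix p (len>=2) equals the number of words starting with p,
--     # which can only shrink as p grows: so the maximum count M is already attained
--     # at some 2-char prefix.  The answer is then the longest prefix with count M of
--     # the first word w whose 2-char prefix attains M, i.e. w cut at the minimal
--     # common-prefix length of w with the words sharing its 2-char prefix.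
--     count2 = {}
--     for u in arr:
--         if len(u) >= 2:
--             k = u[:2]
--             count2[k] = count2.get(k, 0) + 1
--     winner = max(count2.values())
--     w = next(u for u in arr if len(u) >= 2 and count2[u[:2]] == winner)
--     k2 = w[:2]
--     p = w
--     i = len(w)
--     for u in arr:
--         if u.startswith(p):      # common prefix with w is already >= i: no change
--             continue
--         if len(u) >= 2 and u[:2] == k2:
--             l = 0
--             while l < len(u) and l < len(w) and u[l] == w[l]:
--                 l += 1
--             i = l
--             p = w[:i]
--     return p
-- ===== Notes on version B (the rewrite author's own statement) =====
-- stated objective: faster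
-- what changed: B never enumerates all O(L) prefixes per word: since a prefix's count can only shrink as it grows, the maximum count is attained at a 2-char prefix, so B counts only 2-char prefixes, finds the first word w whose 2-char prefix attains the maximum, and returns w cut at the minimal common-prefix length with the words sharing its 2-char prefix.
import Mathlib
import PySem

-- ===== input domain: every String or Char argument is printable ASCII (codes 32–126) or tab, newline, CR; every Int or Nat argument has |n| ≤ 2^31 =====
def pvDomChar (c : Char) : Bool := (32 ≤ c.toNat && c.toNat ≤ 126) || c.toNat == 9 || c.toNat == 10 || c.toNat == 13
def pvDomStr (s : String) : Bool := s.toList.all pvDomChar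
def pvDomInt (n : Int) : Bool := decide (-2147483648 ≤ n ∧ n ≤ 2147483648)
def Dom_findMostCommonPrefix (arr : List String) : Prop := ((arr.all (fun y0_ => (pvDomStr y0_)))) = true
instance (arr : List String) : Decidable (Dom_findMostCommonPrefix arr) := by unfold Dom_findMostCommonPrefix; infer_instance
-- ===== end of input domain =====

-- B avoids enumerating every prefix of every word: the maximum count is attained at a
-- 2-char prefix (counts shrink as prefixes grow), so B counts 2-char prefixes only and
-- cuts the first maximal word at the minimal common-prefix length of its group
-- (objective: faster, O(N*L) instead of O(N*L^2); return value only, no side effects).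

-- ===== PORT A =====
def findMostCommonPrefix (arr : List String) : String :=
  let prefixes : PySem.Dict String Int :=
    arr.foldl (fun d word =>
      (PySem.List.pyRange (PySem.Str.len word) 1 (-1)).foldl (fun d i =>
        let pfx := PySem.Str.slice word (some 0) (some i)
        if d.contains pfx then d.insert pfx (d.getD pfx 0 + 1) else d.insert pfx 1) d)
      PySem.Dict.empty
  match PySem.List.max? prefixes.values (fun v => v) with
  | none => ""          -- max(()) raises ValueError in Python; excluded by Pre_
  | some winner =>
    match prefixes.items.find? (fun kv => kv.2 == winner) with
    | some kv => kv.1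
    | none => ""        -- unreachable: winner is one of the values

-- ===== PORT B =====
-- the while loop 'l = 0; while l < len(u) and l < len(w) and u[l] == w[l]: l += 1'
def pvCommonLen : List Char → List Char → Nat
  | x :: xs, y :: ys => if x == y then pvCommonLen xs ys + 1 else 0
  | _, _ => 0

def findMostCommonPrefix_alt (arr : List String) : String :=
  let count2 : PySem.Dict String Int :=
    arr.foldl (fun d u =>
      if 2 ≤ PySem.Str.len u then
        let k := PySem.Str.slice u (some 0) (some 2)
        d.insert k (d.getD k 0 + 1)
      else d) PySem.Dict.empty
  match PySem.List.max? count2.values (fun v => v) with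
  | none => ""          -- max(()) raises ValueError in Python; excluded by Pre_
  | some winner =>
    match arr.find? (fun u => decide (2 ≤ PySem.Str.len u) &&
        (count2.getD (PySem.Str.slice u (some 0) (some 2)) 0 == winner)) with
    | none => ""        -- unreachable: winner is the count of some word's 2-char prefix
    | some w =>
      let k2 := PySem.Str.slice w (some 0) (some 2)
      let s : Int × String := arr.foldl (fun s u =>
        if PySem.Str.startswith u s.2 then s
        else if decide (2 ≤ PySem.Str.len u) &&
            (PySem.Str.slice u (some 0) (some 2) == k2) then
          let l : Int := (pvCommonLen u.toList w.toList : Int)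
          (l, PySem.Str.slice w (some 0) (some l))
        else s) (PySem.Str.len w, w)
      s.2

-- ===== PRECONDITION & SPEC =====
-- Pre_ excludes exactly the inputs where no word has length ≥ 2: there are no prefixes,
-- and both Pythons raise ValueError on max() of an empty sequence.
def Pre_findMostCommonPrefix (arr : List String) : Prop :=
  ∃ w ∈ arr, 2 ≤ (PySem.Str.len w)
instance (arr : List String) : Decidable (Pre_findMostCommonPrefix arr) := by
  unfold Pre_findMostCommonPrefix; infer_instance
def pvWitness_findMostCommonPrefix : List String := (["ab", "abc"])

def Spec_findMostCommonPrefix (arr : List String) (out : String) : Prop := out = findMostCommonPrefix_alt arr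
instance (arr : List String) (out : String) : Decidable (Spec_findMostCommonPrefix arr out) := by unfold Spec_findMostCommonPrefix; infer_instance

-- ===== CLAIM (what is proved, stated in full; the proofs are below) =====
def Claim_equal_findMostCommonPrefix : Prop := ∀ (arr : List String), Dom_findMostCommonPrefix arr → Pre_findMostCommonPrefix arr → Spec_findMostCommonPrefix arr (findMostCommonPrefix arr)

-- ===== LEMMAS AND PROOFS =====

theorem pv_pyRange_desc (n : Nat) :
    PySem.List.pyRange (n : Int) 1 (-1) = ((List.range' 2 (n - 1)).map (Nat.cast : Nat → Int)).reverse := by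
  induction n with
  | zero => decide
  | succ k ih =>
    by_cases hk : k ≤ 0
    · interval_cases k
      decide
    · rw [PySem.List.pyRange_neg_one_cons (by omega : (1:Int) < (k+1 : Nat))]
      have h1 : ((k+1 : Nat) : Int) - 1 = (k : Int) := by push_cast; ring
      rw [h1, ih]
      have h2 : k + 1 - 1 = (k - 1) + 1 := by omega
      rw [h2, List.range'_1_concat]
      simp
      omega

theorem pv_perWord_eq (u : String) :
    (PySem.List.pyRange (PySem.Str.len u) 1 (-1)).map (fun i => PySem.Str.slice u (some 0) (some i))
      = ((List.range' 2 (u.toList.length - 1)).map (fun i => String.ofList (u.toList.take i))).reverse := by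
  have hlen : PySem.Str.len u = (u.toList.length : Int) := by simp [PySem.Str.len_eq]
  rw [hlen, pv_pyRange_desc, List.map_reverse, List.map_map]
  congr 1
  apply List.map_congr_left
  intro i hi
  simp only [Function.comp_apply]
  apply String.toList_inj.mp
  rw [PySem.Str.toList_slice, PySem.Chars.slice_eq_listSlice, PySem.List.slice_zero_start, PySem.List.slice_to_natCast]
  simp

def pvSeq (arr : List String) : List String :=
  arr.flatMap (fun word =>
    (PySem.List.pyRange (PySem.Str.len word) 1 (-1)).map (fun i =>
      PySem.Str.slice word (some 0) (some i)))

def pvCnt (arr : List String) (p : String) : Nat :=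
  arr.countP (fun u => p.toList.isPrefixOf u.toList)

theorem pv_perWord_count (u p : String) (hp : 2 ≤ p.toList.length) :
    ((PySem.List.pyRange (PySem.Str.len u) 1 (-1)).map (fun i =>
      PySem.Str.slice u (some 0) (some i))).count p
      = if p.toList.isPrefixOf u.toList then 1 else 0 := by
  rw [pv_perWord_eq, List.count_reverse, List.count_eq_countP, List.countP_map]
  by_cases hpre : p.toList.isPrefixOf u.toList
  · simp only [hpre, if_true]
    have hpre' : p.toList <+: u.toList := List.isPrefixOf_iff_prefix.mp hpre
    have hlen : p.toList.length ≤ u.toList.length := hpre'.length_le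
    have htake : u.toList.take p.toList.length = p.toList := (List.prefix_iff_eq_take.mp hpre').symm
    have hcong : List.countP ((fun x => x == p) ∘ fun i => String.ofList (u.toList.take i))
          (List.range' 2 (u.toList.length - 1))
        = List.countP (fun i => i == p.toList.length) (List.range' 2 (u.toList.length - 1)) := by
      apply List.countP_congr
      intro i hi
      rw [List.mem_range'_1] at hi
      have hin : i ≤ u.toList.length := by omega
      simp only [Function.comp_apply]
      by_cases hip : i = p.toList.length
      · subst hip
        rw [htake, String.ofList_toList]
        simp
      · have hne : u.toList.take i ≠ p.toList := by
          intro hEq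
          have := congrArg List.length hEq
          rw [List.length_take] at this
          omega
        have h1 : (String.ofList (u.toList.take i) == p) = false := by
          simp only [beq_eq_false_iff_ne, ne_eq, ← String.toList_inj, String.toList_ofList]
          exact hne
        have h2 : (i == p.toList.length) = false := by simpa using hip
        rw [h1, h2]
    rw [hcong, ← List.count_eq_countP, List.count_eq_one_of_mem (List.nodup_range') ?_]
    rw [List.mem_range'_1]
    omega
  · simp only [hpre, if_false]
    apply List.countP_eq_zero.mpr
    intro i hi
    simp only [Function.comp_apply]
    intro hEq
    have hEq2 : u.toList.take i = p.toList := by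
      have h3 := beq_iff_eq.mp hEq
      rw [← h3, String.toList_ofList]
    apply hpre
    rw [List.isPrefixOf_iff_prefix]
    exact hEq2 ▸ List.take_prefix i u.toList

theorem pv_seq_count (arr : List String) (p : String) (hp : 2 ≤ p.toList.length) :
    (pvSeq arr).count p = pvCnt arr p := by
  induction arr with
  | nil => rfl
  | cons u t ih =>
    rw [pvSeq, List.flatMap_cons, ← pvSeq, List.count_append, ih, pv_perWord_count u p hp]
    show _ = List.countP _ (u :: t)
    rw [List.countP_cons]
    show _ = pvCnt t p + _
    by_cases h : p.toList.isPrefixOf u.toList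
    · simp only [h, if_true]
      omega
    · simp only [h, if_false]
      omega

theorem pv_mem_seq {arr : List String} {p : String} (h : p ∈ pvSeq arr) :
    2 ≤ p.toList.length ∧ ∃ u ∈ arr, p.toList.isPrefixOf u.toList = true := by
  rw [pvSeq, List.mem_flatMap] at h
  obtain ⟨u, hu, hmem⟩ := h
  rw [pv_perWord_eq, List.mem_reverse, List.mem_map] at hmem
  obtain ⟨i, hi, rfl⟩ := hmem
  rw [List.mem_range'_1] at hi
  have hin : i ≤ u.toList.length := by omega
  constructor
  · rw [String.toList_ofList, List.length_take]; omega
  · exact ⟨u, hu, by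
      rw [String.toList_ofList, List.isPrefixOf_iff_prefix]
      exact List.take_prefix i u.toList⟩

theorem pv_seq_mem_of {arr : List String} {u : String} (hu : u ∈ arr) (h2 : 2 ≤ u.toList.length) :
    String.ofList (u.toList.take 2) ∈ pvSeq arr := by
  rw [pvSeq, List.mem_flatMap]
  refine ⟨u, hu, ?_⟩
  rw [pv_perWord_eq, List.mem_reverse, List.mem_map]
  exact ⟨2, by rw [List.mem_range'_1]; omega, rfl⟩

theorem pv_cnt_mono (arr : List String) (p q : String)
    (h : q.toList.isPrefixOf p.toList = true) : pvCnt arr p ≤ pvCnt arr q := by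
  apply List.countP_mono_left
  intro u _ hup
  rw [List.isPrefixOf_iff_prefix] at *
  exact List.IsPrefix.trans h hup

theorem pv_max?_eq {xs : List Int} {m : Int} (hm : m ∈ xs) (hub : ∀ y ∈ xs, y ≤ m) :
    PySem.List.max? xs (fun v => v) = some m := by
  cases h : PySem.List.max? xs (fun v => v) with
  | none =>
    rw [PySem.List.max?_eq_none_iff] at h
    subst h; cases hm
  | some m' =>
    have h1 := PySem.List.max?_mem h
    have h2 : m ≤ m' := by simpa using PySem.List.max?_isMax h m hm
    have h3 := hub m' h1
    exact congrArg some (le_antisymm h3 h2)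

theorem pv_find?_flatMap {α β : Type} (f : α → List β) (q : β → Bool) (l : List α) :
    (l.flatMap f).find? q = l.findSome? (fun u => (f u).find? q) := by
  induction l with
  | nil => rfl
  | cons u t ih =>
    rw [List.flatMap_cons, List.find?_append, List.findSome?_cons]
    cases h : (f u).find? q with
    | none => simpa using ih
    | some b => simp

theorem pv_take_prefix_iff (u w : List Char) (i : Nat) (hi : i ≤ w.length) :
    (w.take i).isPrefixOf u = true ↔ i ≤ pvCommonLen u w := by
  induction u generalizing w i with
  | nil =>
    cases i with
    | zero => simp [pvCommonLen]
    | succ j =>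
      cases w with
      | nil => exact absurd hi (by simp)
      | cons y ys => simp [pvCommonLen, List.isPrefixOf]
  | cons x xs ih =>
    cases i with
    | zero => simp [pvCommonLen]
    | succ j =>
      cases w with
      | nil => exact absurd hi (by simp)
      | cons y ys =>
        simp only [List.take_succ_cons, List.isPrefixOf, pvCommonLen]
        by_cases hxy : x = y
        · subst hxy
          simp only [beq_self_eq_true, if_true, Bool.true_and]
          rw [ih ys j (by simpa using hi)]
          omega
        · have h1 : (y == x) = false := by simp [Ne.symm hxy]
          have h2 : (x == y) = false := by simp [hxy]
          rw [h1, h2]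
          simp

def pvKeys2 (arr : List String) : List String :=
  (arr.filter (fun u => decide (2 ≤ PySem.Str.len u))).map
    (fun u => PySem.Str.slice u (some 0) (some 2))

def pvGroup (arr : List String) (w : String) : List String :=
  arr.filter (fun u => decide (2 ≤ PySem.Str.len u) &&
    (PySem.Str.slice u (some 0) (some 2) == PySem.Str.slice w (some 0) (some 2)))

def pvMinI (arr : List String) (w : String) : Int :=
  (pvGroup arr w).foldl (fun i u => min i ((pvCommonLen u.toList w.toList : Nat) : Int))
    (PySem.Str.len w)

theorem pv_foldl_flatMap {α β γ : Type} (m : α → List β) (g : γ → β → γ) :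
    ∀ (arr : List α) (init : γ),
      arr.foldl (fun d w => (m w).foldl g d) init = (arr.flatMap m).foldl g init := by
  intro arr
  induction arr with
  | nil => intro init; rfl
  | cons w t ih => intro init; simp [List.flatMap_cons, List.foldl_append, ih]

-- A's dict is the Counter of the flattened prefix sequence
theorem pv_A_dict (arr : List String) :
    arr.foldl (fun d word =>
      (PySem.List.pyRange (PySem.Str.len word) 1 (-1)).foldl (fun d i =>
        let pfx := PySem.Str.slice word (some 0) (some i)
        if d.contains pfx then d.insert pfx (d.getD pfx 0 + 1) else d.insert pfx 1) d)
      PySem.Dict.empty = PySem.Dict.counter (pvSeq arr) := by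
  have hfun : (fun (d : PySem.Dict String Int) (word : String) =>
        (PySem.List.pyRange (PySem.Str.len word) 1 (-1)).foldl (fun d i =>
          if d.contains (PySem.Str.slice word (some 0) (some i)) then
            d.insert (PySem.Str.slice word (some 0) (some i))
              (d.getD (PySem.Str.slice word (some 0) (some i)) 0 + 1)
          else d.insert (PySem.Str.slice word (some 0) (some i)) 1) d)
      = (fun (d : PySem.Dict String Int) (word : String) =>
        ((PySem.List.pyRange (PySem.Str.len word) 1 (-1)).map (fun i =>
          PySem.Str.slice word (some 0) (some i))).foldl
            (fun d p => d.insert p (d.getD p 0 + 1)) d) := by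
    funext d word
    rw [List.foldl_map]
    have h2 : (fun (d : PySem.Dict String Int) (i : Int) =>
          if d.contains (PySem.Str.slice word (some 0) (some i)) then
            d.insert (PySem.Str.slice word (some 0) (some i))
              (d.getD (PySem.Str.slice word (some 0) (some i)) 0 + 1)
          else d.insert (PySem.Str.slice word (some 0) (some i)) 1)
        = (fun (d : PySem.Dict String Int) (i : Int) =>
            d.insert (PySem.Str.slice word (some 0) (some i))
              (d.getD (PySem.Str.slice word (some 0) (some i)) 0 + 1)) := by
      funext d i
      by_cases h : d.contains (PySem.Str.slice word (some 0) (some i)) = true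
      · simp [h]
      · have h0 := PySem.Dict.getD_of_not_contains d (k := PySem.Str.slice word (some 0) (some i))
          (0 : Int) (by simpa using h)
        simp [h, h0]
    rw [h2]
  show (arr.foldl (fun d word =>
      (PySem.List.pyRange (PySem.Str.len word) 1 (-1)).foldl (fun d i =>
        if d.contains (PySem.Str.slice word (some 0) (some i)) then
          d.insert (PySem.Str.slice word (some 0) (some i))
            (d.getD (PySem.Str.slice word (some 0) (some i)) 0 + 1)
        else d.insert (PySem.Str.slice word (some 0) (some i)) 1) d)
      (PySem.Dict.empty : PySem.Dict String Int))
    = _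
  rw [hfun, pv_foldl_flatMap, ← pvSeq, PySem.Dict.foldl_insert_getD_add_one_eq_counter]

-- B's dict is the Counter of the 2-char-prefix key list
theorem pv_B_dict (arr : List String) :
    arr.foldl (fun d u =>
      if 2 ≤ PySem.Str.len u then
        d.insert (PySem.Str.slice u (some 0) (some 2))
          (d.getD (PySem.Str.slice u (some 0) (some 2)) 0 + 1)
      else d) PySem.Dict.empty = PySem.Dict.counter (pvKeys2 arr) := by
  rw [PySem.List.foldl_ite_eq_foldl_filter (p := fun u => 2 ≤ PySem.Str.len u)]
  rw [pvKeys2, ← PySem.Dict.foldl_insert_getD_add_one_eq_counter, List.foldl_map]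

-- common-prefix length facts for the B loop
theorem pv_commonLen_le_right (u w : List Char) : pvCommonLen u w ≤ w.length := by
  induction u generalizing w with
  | nil => cases w <;> simp [pvCommonLen]
  | cons x xs ih =>
    cases w with
    | nil => simp [pvCommonLen]
    | cons y ys =>
      simp only [pvCommonLen, List.length_cons]
      split_ifs
      · have := ih ys; omega
      · omega

theorem pv_len (u : String) : PySem.Str.len u = (u.toList.length : Int) := by
  simp [PySem.Str.len_eq]

theorem pv_slice2 (u : String) :
    PySem.Str.slice u (some 0) (some 2) = String.ofList (u.toList.take 2) := by
  apply String.toList_inj.mp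
  rw [PySem.Str.toList_slice, PySem.Chars.slice_eq_listSlice, PySem.List.slice_zero_start,
    PySem.List.slice_to _ (by norm_num : (0:Int) ≤ 2)]
  simp

theorem pv_sliceN (w : String) (i : Int) (h : 0 ≤ i) :
    PySem.Str.slice w (some 0) (some i) = String.ofList (w.toList.take i.toNat) := by
  apply String.toList_inj.mp
  rw [PySem.Str.toList_slice, PySem.Chars.slice_eq_listSlice, PySem.List.slice_zero_start,
    PySem.List.slice_to _ h]
  simp

theorem pv_take2_of_prefix {p u : List Char} (h : p <+: u) (h2 : 2 ≤ p.length) :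
    u.take 2 = p.take 2 := by
  obtain ⟨t, rfl⟩ := h
  rw [List.take_append_of_le_length h2]

theorem pv_keys2_mem {arr : List String} {k : String} :
    k ∈ pvKeys2 arr ↔ ∃ u ∈ arr, 2 ≤ u.toList.length ∧ k = String.ofList (u.toList.take 2) := by
  rw [pvKeys2, List.mem_map]
  constructor
  · rintro ⟨u, hu, rfl⟩
    rw [List.mem_filter] at hu
    refine ⟨u, hu.1, ?_, (pv_slice2 u).symm ▸ rfl⟩
    have := of_decide_eq_true hu.2
    rw [pv_len] at this; omega
  · rintro ⟨u, hu, h2, rfl⟩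
    refine ⟨u, List.mem_filter.mpr ⟨hu, decide_eq_true ?_⟩, (pv_slice2 u)⟩
    rw [pv_len]; omega

theorem pv_keys2_count (arr : List String) (k : String) (hk : k.toList.length = 2) :
    (pvKeys2 arr).count k = pvCnt arr k := by
  rw [pvKeys2, List.count_eq_countP, List.countP_map, List.countP_filter, pvCnt]
  apply List.countP_congr
  intro u _
  rw [Bool.eq_iff_iff]
  simp only [Function.comp_apply, Bool.and_eq_true, decide_eq_true_eq, beq_iff_eq, iff_true]
  constructor
  · rintro ⟨hs, hl⟩
    rw [pv_len] at hl
    rw [pv_slice2, ← String.toList_inj, String.toList_ofList] at hs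
    rw [List.isPrefixOf_iff_prefix, ← hs]
    exact List.take_prefix 2 u.toList
  · intro hpre
    rw [List.isPrefixOf_iff_prefix] at hpre
    have hlen : 2 ≤ u.toList.length := by
      have := hpre.length_le; omega
    refine ⟨?_, by rw [pv_len]; exact_mod_cast hlen⟩
    rw [pv_slice2, ← String.toList_inj, String.toList_ofList]
    rw [pv_take2_of_prefix hpre (by omega), ← hk, List.take_length]

theorem pv_counter_values {α : Type} [BEq α] [LawfulBEq α] (xs : List α) :
    (PySem.Dict.counter xs).values = (PySem.Set.ofList xs).map (fun k => (xs.count k : Int)) := by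
  have h := PySem.Dict.items_counter (xs := xs)
  calc (PySem.Dict.counter xs).values
      = (PySem.Dict.counter xs).items.map (·.2) := by simp [PySem.Dict.values, PySem.Dict.items]
    _ = _ := by rw [h, List.map_map]; rfl

theorem pv_find?_congr {α : Type} (l : List α) (p q : α → Bool) (h : ∀ x ∈ l, p x = q x) :
    l.find? p = l.find? q := by
  induction l with
  | nil => rfl
  | cons x t ih =>
    rw [List.find?_cons, List.find?_cons, h x List.mem_cons_self]
    cases q x with
    | true => rfl
    | false => exact ih (fun y hy => h y (List.mem_cons_of_mem x hy))

theorem pv_findSome?_bind {α β : Type} (l : List α) (g : α → Option β) (pred : α → Bool)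
    (h : ∀ u ∈ l, (g u).isSome = pred u) :
    l.findSome? g = (l.find? pred).bind g := by
  induction l with
  | nil => rfl
  | cons x t ih =>
    rw [List.findSome?_cons, List.find?_cons]
    have hx := h x List.mem_cons_self
    cases hp : pred x with
    | true =>
      rw [hp] at hx
      cases hgx : g x with
      | some b => simp [hgx]
      | none => rw [hgx] at hx; simp at hx
    | false =>
      rw [hp] at hx
      cases hgx : g x with
      | some b => rw [hgx] at hx; simp at hx
      | none =>
        simp only [Option.bind]
        exact ih (fun y hy => h y (List.mem_cons_of_mem x hy))

theorem pv_find_desc (a k m : Nat) (h1 : a ≤ m) (h2 : m < a + k) :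
    ((List.range' a k).reverse).find? (fun i => decide (i ≤ m)) = some m := by
  induction k with
  | zero => omega
  | succ j ih =>
    rw [List.range'_1_concat, List.reverse_append, List.reverse_singleton, List.singleton_append,
      List.find?_cons]
    by_cases hm : a + j ≤ m
    · have : m = a + j := by omega
      subst this
      simp
    · rw [decide_eq_false hm]
      exact ih (by omega)

theorem pv_winner (arr : List String) (hpre : ∃ u ∈ arr, 2 ≤ u.toList.length) :
    ∃ M : Int,
      PySem.List.max? (PySem.Dict.counter (pvSeq arr)).values (fun v => v) = some M ∧
      PySem.List.max? (PySem.Dict.counter (pvKeys2 arr)).values (fun v => v) = some M ∧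
      (∀ p ∈ pvSeq arr, (pvCnt arr p : Int) ≤ M) := by
  obtain ⟨u0, hu0, hu02⟩ := hpre
  have hk0 : String.ofList (u0.toList.take 2) ∈ pvKeys2 arr :=
    pv_keys2_mem.mpr ⟨u0, hu0, hu02, rfl⟩
  -- the B-side max exists
  have hVB : (PySem.Dict.counter (pvKeys2 arr)).values ≠ [] := by
    rw [pv_counter_values]
    intro h
    rw [List.map_eq_nil_iff] at h
    have := (PySem.Set.mem_ofList (pvKeys2 arr) _).mpr hk0
    rw [h] at this
    cases this
  obtain ⟨M, hMB⟩ : ∃ M, PySem.List.max? (PySem.Dict.counter (pvKeys2 arr)).values (fun v => v) = some M := by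
    cases h : PySem.List.max? (PySem.Dict.counter (pvKeys2 arr)).values (fun v => v) with
    | none => exact absurd ((PySem.List.max?_eq_none_iff _ _).mp h) hVB
    | some m => exact ⟨m, rfl⟩
  -- key count facts
  have hkey_len : ∀ k ∈ pvKeys2 arr, k.toList.length = 2 := by
    intro k hk
    obtain ⟨u, _, h2, rfl⟩ := pv_keys2_mem.mp hk
    rw [String.toList_ofList, List.length_take]
    omega
  -- upper bound over the whole prefix sequence
  have hub : ∀ p ∈ pvSeq arr, (pvCnt arr p : Int) ≤ M := by
    intro p hp
    obtain ⟨hp2, u, hu, hpre'⟩ := pv_mem_seq hp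
    have hpre'' := List.isPrefixOf_iff_prefix.mp hpre'
    have hu2 : 2 ≤ u.toList.length := le_trans hp2 hpre''.length_le
    set q := String.ofList (u.toList.take 2) with hq
    have hqk : q ∈ pvKeys2 arr := pv_keys2_mem.mpr ⟨u, hu, hu2, rfl⟩
    have hqpre : q.toList.isPrefixOf p.toList = true := by
      rw [hq, String.toList_ofList, List.isPrefixOf_iff_prefix,
        pv_take2_of_prefix hpre'' hp2]
      exact List.take_prefix 2 p.toList
    have h1 : pvCnt arr p ≤ pvCnt arr q := pv_cnt_mono arr p q hqpre
    have h2 : ((pvKeys2 arr).count q : Int) ≤ M := by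
      apply PySem.List.max?_isMax hMB
      rw [pv_counter_values, List.mem_map]
      exact ⟨q, (PySem.Set.mem_ofList _ _).mpr hqk, rfl⟩
    have h3 : (pvKeys2 arr).count q = pvCnt arr q := pv_keys2_count arr q (hkey_len q hqk)
    rw [h3] at h2
    exact le_trans (by exact_mod_cast h1) h2
  -- M is the count of some key, which also appears in the sequence
  refine ⟨M, ?_, hMB, hub⟩
  have hMmem := PySem.List.max?_mem hMB
  rw [pv_counter_values, List.mem_map] at hMmem
  obtain ⟨kM, hkM, hMeq⟩ := hMmem
  rw [PySem.Set.mem_ofList] at hkM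
  have hkMlen := hkey_len kM hkM
  have hkMcnt : ((pvKeys2 arr).count kM : Int) = M := hMeq
  rw [pv_keys2_count arr kM hkMlen] at hkMcnt
  obtain ⟨uM, huM, huM2, hkMeq⟩ := pv_keys2_mem.mp hkM
  have hkMseq : kM ∈ pvSeq arr := by rw [hkMeq]; exact pv_seq_mem_of huM huM2
  apply pv_max?_eq
  · rw [pv_counter_values, List.mem_map]
    refine ⟨kM, (PySem.Set.mem_ofList _ _).mpr hkMseq, ?_⟩
    rw [pv_seq_count arr kM (by omega)]
    exact hkMcnt
  · intro y hy
    rw [pv_counter_values, List.mem_map] at hy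
    obtain ⟨p, hpmem, rfl⟩ := hy
    rw [PySem.Set.mem_ofList] at hpmem
    have hp2 := (pv_mem_seq hpmem).1
    rw [pv_seq_count arr p hp2]
    exact hub p hpmem

theorem pv_perWord_isSome (arr : List String) (M : Int)
    (hub : ∀ p ∈ pvSeq arr, (pvCnt arr p : Int) ≤ M) (u : String) (hu : u ∈ arr) :
    (((PySem.List.pyRange (PySem.Str.len u) 1 (-1)).map (fun i =>
        PySem.Str.slice u (some 0) (some i))).find?
      (fun p => ((pvCnt arr p : Int) == M))).isSome
    = (decide (2 ≤ PySem.Str.len u) &&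
        ((pvCnt arr (String.ofList (u.toList.take 2)) : Int) == M)) := by
  rw [Bool.eq_iff_iff, List.find?_isSome]
  simp only [Bool.and_eq_true, decide_eq_true_eq, beq_iff_eq]
  constructor
  · rintro ⟨p, hpmem, hpM⟩
    rw [pv_perWord_eq, List.mem_reverse, List.mem_map] at hpmem
    obtain ⟨i, hi, rfl⟩ := hpmem
    rw [List.mem_range'_1] at hi
    have hn : 2 ≤ u.toList.length := by omega
    refine ⟨by rw [pv_len]; exact_mod_cast hn, ?_⟩
    have hM := hpM
    -- take-2 prefix dominates: its count is squeezed between M and M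
    have hle : pvCnt arr (String.ofList (u.toList.take i)) ≤
        pvCnt arr (String.ofList (u.toList.take 2)) := by
      apply pv_cnt_mono
      rw [String.toList_ofList, String.toList_ofList, List.isPrefixOf_iff_prefix]
      rw [show u.toList.take 2 = (u.toList.take i).take 2 by
        rw [List.take_take]; congr 1; omega]
      exact List.take_prefix 2 (u.toList.take i)
    have hge : (pvCnt arr (String.ofList (u.toList.take 2)) : Int) ≤ M := by
      apply hub
      exact pv_seq_mem_of hu hn
    omega
  · rintro ⟨h2, hM⟩
    rw [pv_len] at h2
    have hn : 2 ≤ u.toList.length := by exact_mod_cast h2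
    refine ⟨String.ofList (u.toList.take 2), ?_, by simpa using hM⟩
    rw [pv_perWord_eq, List.mem_reverse, List.mem_map]
    exact ⟨2, by rw [List.mem_range'_1]; omega, rfl⟩

theorem pv_group_mem {arr : List String} {w u : String} :
    u ∈ pvGroup arr w ↔ u ∈ arr ∧ 2 ≤ u.toList.length ∧ u.toList.take 2 = w.toList.take 2 := by
  rw [pvGroup, List.mem_filter]
  simp only [Bool.and_eq_true, decide_eq_true_eq, beq_iff_eq]
  constructor
  · rintro ⟨hu, h2, hs⟩
    rw [pv_len] at h2
    rw [pv_slice2, pv_slice2, ← String.toList_inj, String.toList_ofList, String.toList_ofList] at hs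
    exact ⟨hu, by exact_mod_cast h2, hs⟩
  · rintro ⟨hu, h2, hs⟩
    refine ⟨hu, ⟨by rw [pv_len]; exact_mod_cast h2, ?_⟩⟩
    rw [pv_slice2, pv_slice2, ← String.toList_inj, String.toList_ofList, String.toList_ofList]
    exact hs

theorem pv_w_find (arr : List String) (M : Int) (w : String) (hw : w ∈ arr)
    (h2 : 2 ≤ w.toList.length)
    (hM : (pvCnt arr (String.ofList (w.toList.take 2)) : Int) = M) :
    ((PySem.List.pyRange (PySem.Str.len w) 1 (-1)).map (fun i =>
        PySem.Str.slice w (some 0) (some i))).find? (fun p => ((pvCnt arr p : Int) == M))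
      = some (PySem.Str.slice w (some 0) (some (pvMinI arr w))) := by
  set n := w.toList.length with hn
  set G := pvGroup arr w with hG
  set lst := G.map (fun u => ((pvCommonLen u.toList w.toList : Nat) : Int)) with hlst
  have hiB : pvMinI arr w = lst.foldl min (n : Int) := by
    rw [pvMinI, pv_len, hlst, List.foldl_map, ← hG, ← hn]
  set iB := lst.foldl min (n : Int) with hiBdef
  have hwG : w ∈ G := pv_group_mem.mpr ⟨hw, h2, rfl⟩
  have hcl2 : ∀ u ∈ G, 2 ≤ pvCommonLen u.toList w.toList := by
    intro u hu
    obtain ⟨_, hu2, hs⟩ := pv_group_mem.mp hu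
    rw [← pv_take_prefix_iff u.toList w.toList 2 (by omega)]
    rw [List.isPrefixOf_iff_prefix, hs.symm]
    exact List.take_prefix 2 u.toList
  obtain ⟨hle, hlb⟩ := PySem.List.foldl_min_le lst (n : Int)
  have hiB2 : 2 ≤ iB := by
    rcases PySem.List.foldl_min_mem lst (n : Int) with h | h
    · rw [← hiBdef] at h; rw [h]; exact_mod_cast h2
    · rw [← hiBdef] at h
      rw [hlst, List.mem_map] at h
      obtain ⟨u, hu, hcl⟩ := h
      have := hcl2 u hu
      omega
  set m := iB.toNat with hm
  have hmiB : (m : Int) = iB := by omega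
  have hm2 : 2 ≤ m := by omega
  have hmn : m ≤ n := by omega
  -- the count of w's length-i prefix is maximal iff i ≤ m
  have hchar : ∀ i : Nat, 2 ≤ i → i ≤ n →
      ((pvCnt arr (String.ofList (w.toList.take i)) : Int) = M ↔ i ≤ m) := by
    have hcntG : ∀ i : Nat, 2 ≤ i → i ≤ n →
        pvCnt arr (String.ofList (w.toList.take i))
          = G.countP (fun u => decide (i ≤ pvCommonLen u.toList w.toList)) := by
      intro i hi2 hin
      rw [pvCnt, hG, pvGroup, List.countP_filter]
      apply List.countP_congr
      intro u _
      rw [Bool.eq_iff_iff]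
      simp only [String.toList_ofList, Bool.and_eq_true, decide_eq_true_eq, beq_iff_eq, iff_true]
      constructor
      · intro hpre
        have hpre' := List.isPrefixOf_iff_prefix.mp hpre
        have hlen : i ≤ u.toList.length := by
          have := hpre'.length_le
          rw [List.length_take] at this
          omega
        have htk2 : u.toList.take 2 = w.toList.take 2 := by
          rw [pv_take2_of_prefix hpre' (by rw [List.length_take]; omega), List.take_take]
          congr 1
          omega
        refine ⟨?_, ⟨by rw [pv_len]; exact_mod_cast le_trans (by omega) hlen, ?_⟩⟩
        · exact (pv_take_prefix_iff u.toList w.toList i hin).mp hpre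
        · rw [pv_slice2, pv_slice2, ← String.toList_inj, String.toList_ofList,
            String.toList_ofList]
          exact htk2
      · rintro ⟨hcl, _, _⟩
        exact (pv_take_prefix_iff u.toList w.toList i hin).mpr hcl
    have hMlen : M = (G.length : Int) := by
      rw [← hM, hcntG 2 (by omega) (by omega)]
      congr 1
      apply List.countP_eq_length.mpr
      intro u hu
      simpa using hcl2 u hu
    intro i hi2 hin
    rw [hcntG i hi2 hin, hMlen]
    rw [Nat.cast_inj]
    constructor
    · intro hlen
      have hall := List.countP_eq_length.mp hlen
      -- i is a lower bound of lst ∪ {n}, hence i ≤ iB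
      have hilb : (i : Int) ≤ iB := by
        rcases PySem.List.foldl_min_mem lst (n : Int) with h | h
        · rw [← hiBdef] at h; rw [h]; exact_mod_cast hin
        · rw [← hiBdef] at h
          rw [hlst, List.mem_map] at h
          obtain ⟨u, hu, hcl⟩ := h
          have := of_decide_eq_true (hall u hu)
          omega
      omega
    · intro him
      apply List.countP_eq_length.mpr
      intro u hu
      have : iB ≤ ((pvCommonLen u.toList w.toList : Nat) : Int) :=
        hlb _ (by rw [hlst]; exact List.mem_map_of_mem hu)
      simp only [decide_eq_true_eq]
      omega
  -- descending search stops exactly at i = m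
  rw [pv_perWord_eq, ← List.map_reverse, List.find?_map, ← hn]
  have hcong : (List.range' 2 (n - 1)).reverse.find?
        ((fun p => ((pvCnt arr p : Int) == M)) ∘ fun i => String.ofList (w.toList.take i))
      = (List.range' 2 (n - 1)).reverse.find? (fun i => decide (i ≤ m)) := by
    apply pv_find?_congr
    intro i hi
    rw [List.mem_reverse, List.mem_range'_1] at hi
    simp only [Function.comp_apply]
    rw [Bool.eq_iff_iff]
    simp only [beq_iff_eq, decide_eq_true_eq]
    exact hchar i (by omega) (by omega)
  rw [hcong, pv_find_desc 2 (n - 1) m hm2 (by omega), Option.map_some, hiB,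
    pv_sliceN w iB (by omega)]

theorem pv_find?_foldl_add {α : Type} [BEq α] [LawfulBEq α] (q : α → Bool) :
    ∀ (l : List α) (s : List α),
      (l.foldl PySem.Set.add s).find? q = (s.find? q).or (l.find? q) := by
  intro l
  induction l with
  | nil => intro s; simp
  | cons x t ih =>
    intro s
    rw [List.foldl_cons, ih]
    by_cases hc : PySem.Set.contains s x = true
    · have hmem : x ∈ s := by simpa [PySem.Set.contains] using hc
      have hadd : PySem.Set.add s x = s := by simp [PySem.Set.add, hmem]
      rw [hadd]
      cases hs : List.find? q s with
      | some y => rw [Option.some_or, Option.some_or]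
      | none =>
        have hx : q x = false := by simpa using (List.find?_eq_none.mp hs x hmem)
        rw [Option.none_or, Option.none_or]
        simp [hx]
    · have hmem : x ∉ s := by simpa [PySem.Set.contains] using hc
      have hadd : PySem.Set.add s x = s ++ [x] := by simp [PySem.Set.add, hmem]
      rw [hadd, List.find?_append]
      cases hs : List.find? q s with
      | some y => rw [Option.some_or, Option.some_or, Option.some_or]
      | none =>
        rw [Option.none_or, Option.none_or]
        cases hx : q x with
        | true => simp [hx]
        | false => simp [hx]

theorem pv_find?_ofList {α : Type} [BEq α] [LawfulBEq α] (q : α → Bool) (l : List α) :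
    (PySem.Set.ofList l).find? q = l.find? q := by
  have := pv_find?_foldl_add q l []
  simpa [PySem.Set.ofList, PySem.Set.empty] using this

-- u.startswith(w[:i]) says exactly that the common prefix of u and w reaches i
theorem pv_startswith_iff (u w : String) (i : Int) (h0 : 0 ≤ i)
    (hi : i ≤ (w.toList.length : Int)) :
    PySem.Str.startswith u (PySem.Str.slice w (some 0) (some i)) = true
      ↔ i ≤ ((pvCommonLen u.toList w.toList : Nat) : Int) := by
  rw [pv_sliceN w i h0, PySem.Str.startswith_eq]
  rw [String.toList_ofList, PySem.Chars.startswith_iff, ← List.isPrefixOf_iff_prefix,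
    pv_take_prefix_iff u.toList w.toList i.toNat (by omega)]
  omega

-- B's minimisation loop keeps the invariant (i, w[:i]) and computes the group minimum
theorem pv_B_min_inv (arr : List String) (w : String) :
    ∀ (l : List String) (i : Int), 2 ≤ i → i ≤ (w.toList.length : Int) →
      l.foldl (fun s u =>
        if PySem.Str.startswith u s.2 then s
        else if decide (2 ≤ PySem.Str.len u) &&
            (PySem.Str.slice u (some 0) (some 2) == PySem.Str.slice w (some 0) (some 2)) then
          (((pvCommonLen u.toList w.toList : Nat) : Int),
            PySem.Str.slice w (some 0) (some ((pvCommonLen u.toList w.toList : Nat) : Int)))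
        else s) (i, PySem.Str.slice w (some 0) (some i))
      = ((l.filter (fun u => decide (2 ≤ PySem.Str.len u) &&
            (PySem.Str.slice u (some 0) (some 2) == PySem.Str.slice w (some 0) (some 2)))).foldl
          (fun a u => min a ((pvCommonLen u.toList w.toList : Nat) : Int)) i,
         PySem.Str.slice w (some 0)
           (some ((l.filter (fun u => decide (2 ≤ PySem.Str.len u) &&
              (PySem.Str.slice u (some 0) (some 2) == PySem.Str.slice w (some 0) (some 2)))).foldl
            (fun a u => min a ((pvCommonLen u.toList w.toList : Nat) : Int)) i))) := by
  intro l
  induction l with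
  | nil => intro i _ _; rfl
  | cons u t ih =>
    intro i h2 hiw
    rw [List.foldl_cons, List.filter_cons]
    beta_reduce
    have hsw := pv_startswith_iff u w i (by omega) hiw
    by_cases hg : (decide (2 ≤ PySem.Str.len u) &&
        (PySem.Str.slice u (some 0) (some 2) == PySem.Str.slice w (some 0) (some 2))) = true
    · rw [hg]
      simp only [if_true]
      by_cases hcl : i ≤ ((pvCommonLen u.toList w.toList : Nat) : Int)
      · rw [if_pos (hsw.mpr hcl), List.foldl_cons]
        have : min i ((pvCommonLen u.toList w.toList : Nat) : Int) = i := by omega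
        rw [this]
        exact ih i h2 hiw
      · rw [if_neg (by rw [hsw]; omega), List.foldl_cons]
        have hcl2 : 2 ≤ pvCommonLen u.toList w.toList := by
          obtain ⟨hu2, hus⟩ := (Bool.and_eq_true _ _).mp hg
          rw [← pv_take_prefix_iff u.toList w.toList 2 (by omega)]
          rw [List.isPrefixOf_iff_prefix]
          have hs : u.toList.take 2 = w.toList.take 2 := by
            have := beq_iff_eq.mp hus
            rw [pv_slice2, pv_slice2, ← String.toList_inj, String.toList_ofList,
              String.toList_ofList] at this
            exact this
          rw [← hs]
          exact List.take_prefix 2 u.toList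
        have hle := pv_commonLen_le_right u.toList w.toList
        have : min i ((pvCommonLen u.toList w.toList : Nat) : Int)
            = ((pvCommonLen u.toList w.toList : Nat) : Int) := by omega
        rw [this]
        exact ih _ (by omega) (by omega)
    · -- u is not in the group: it cannot start with w[:i] either (i ≥ 2)
      have hnsw : PySem.Str.startswith u (PySem.Str.slice w (some 0) (some i)) = false := by
        rw [Bool.eq_false_iff]
        intro hsw'
        apply hg
        have hcl := hsw.mp hsw'
        have hcl2 : 2 ≤ pvCommonLen u.toList w.toList := by omega
        have hpre : (w.toList.take 2).isPrefixOf u.toList = true :=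
          (pv_take_prefix_iff u.toList w.toList 2 (by omega)).mpr hcl2
        have hpre' := List.isPrefixOf_iff_prefix.mp hpre
        have hu2 : 2 ≤ u.toList.length := by
          have := hpre'.length_le
          rw [List.length_take] at this
          omega
        rw [Bool.and_eq_true]
        constructor
        · rw [pv_len]
          simp only [decide_eq_true_eq]
          exact_mod_cast hu2
        · simp only [pv_slice2, beq_iff_eq, ← String.toList_inj, String.toList_ofList]
          rw [pv_take2_of_prefix hpre' (by rw [List.length_take]; omega), List.take_take]
          norm_num
      rw [hnsw]
      simp only [Bool.false_eq_true, if_false, hg]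
      exact ih i h2 hiw

-- B's loop, started at (len w, w), returns w[:pvMinI]
theorem pv_B_min (arr : List String) (w : String) (h2 : 2 ≤ w.toList.length) :
    (arr.foldl (fun s u =>
        if PySem.Str.startswith u s.2 then s
        else if decide (2 ≤ PySem.Str.len u) &&
            (PySem.Str.slice u (some 0) (some 2) == PySem.Str.slice w (some 0) (some 2)) then
          (((pvCommonLen u.toList w.toList : Nat) : Int),
            PySem.Str.slice w (some 0) (some ((pvCommonLen u.toList w.toList : Nat) : Int)))
        else s) (PySem.Str.len w, w)).2
      = PySem.Str.slice w (some 0) (some (pvMinI arr w)) := by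
  have hw : PySem.Str.slice w (some 0) (some ((w.toList.length : Nat) : Int)) = w := by
    rw [pv_sliceN w _ (by positivity), Int.toNat_natCast, List.take_length, String.ofList_toList]
  have hinit : ((PySem.Str.len w), w)
      = (((w.toList.length : Nat) : Int),
         PySem.Str.slice w (some 0) (some ((w.toList.length : Nat) : Int))) := by
    rw [pv_len, hw]
  rw [hinit, pv_B_min_inv arr w arr (w.toList.length : Int) (by exact_mod_cast h2) le_rfl]
  rw [pvMinI, pvGroup, pv_len]

theorem pv_main (arr : List String) (hpre : ∃ u ∈ arr, 2 ≤ (PySem.Str.len u)) :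
    findMostCommonPrefix arr = findMostCommonPrefix_alt arr := by
  have hpre' : ∃ u ∈ arr, 2 ≤ u.toList.length := by
    obtain ⟨u, hu, h⟩ := hpre
    rw [pv_len] at h
    exact ⟨u, hu, by exact_mod_cast h⟩
  obtain ⟨M, hMA, hMB, hub⟩ := pv_winner arr hpre'
  simp only [findMostCommonPrefix, findMostCommonPrefix_alt]
  rw [pv_A_dict, pv_B_dict, hMA, hMB]
  -- both outer matches are on `some M`
  simp only []
  -- A's items scan = a find over the word list
  have hA : (PySem.Dict.counter (pvSeq arr)).items.find? (fun kv => kv.2 == M)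
      = ((arr.find? (fun u => decide (2 ≤ PySem.Str.len u) &&
            ((pvCnt arr (String.ofList (u.toList.take 2)) : Int) == M))).bind
          (fun u => ((PySem.List.pyRange (PySem.Str.len u) 1 (-1)).map (fun i =>
            PySem.Str.slice u (some 0) (some i))).find?
              (fun p => ((pvCnt arr p : Int) == M)))).map
        (fun k => (k, ((pvSeq arr).count k : Int))) := by
    rw [PySem.Dict.items_counter, List.find?_map, pv_find?_ofList]
    have hc : (pvSeq arr).find? ((fun kv : String × Int => kv.2 == M) ∘
          (fun k => (k, ((pvSeq arr).count k : Int))))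
        = (pvSeq arr).find? (fun p => ((pvCnt arr p : Int) == M)) := by
      apply pv_find?_congr
      intro p hp
      simp only [Function.comp_apply]
      rw [pv_seq_count arr p (pv_mem_seq hp).1]
    rw [hc]
    have hflat : (pvSeq arr).find? (fun p => ((pvCnt arr p : Int) == M))
        = arr.findSome? (fun u => ((PySem.List.pyRange (PySem.Str.len u) 1 (-1)).map (fun i =>
            PySem.Str.slice u (some 0) (some i))).find?
              (fun p => ((pvCnt arr p : Int) == M))) := by
      rw [pvSeq, pv_find?_flatMap]
    rw [hflat, pv_findSome?_bind _ _ _ (pv_perWord_isSome arr M hub)]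
  -- B's find uses the same word predicate
  have hBfind : arr.find? (fun u => decide (2 ≤ PySem.Str.len u) &&
        ((PySem.Dict.counter (pvKeys2 arr)).getD (PySem.Str.slice u (some 0) (some 2)) 0 == M))
      = arr.find? (fun u => decide (2 ≤ PySem.Str.len u) &&
        ((pvCnt arr (String.ofList (u.toList.take 2)) : Int) == M)) := by
    apply pv_find?_congr
    intro u _
    rw [PySem.Dict.getD_counter]
    by_cases h2 : 2 ≤ PySem.Str.len u
    · have h2' : 2 ≤ u.toList.length := by rw [pv_len] at h2; exact_mod_cast h2
      rw [pv_slice2, pv_keys2_count arr _ (by rw [String.toList_ofList, List.length_take]; omega)]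
    · rw [decide_eq_false h2]
      simp
  rw [hA, hBfind]
  cases hfind : arr.find? (fun u => decide (2 ≤ PySem.Str.len u) &&
      ((pvCnt arr (String.ofList (u.toList.take 2)) : Int) == M)) with
  | none => simp
  | some w =>
    have hwp := List.find?_some hfind
    rw [Bool.and_eq_true] at hwp
    obtain ⟨hw2, hwM⟩ := hwp
    have hw2' : 2 ≤ w.toList.length := by
      have := of_decide_eq_true hw2
      rw [pv_len] at this
      exact_mod_cast this
    have hwmem := List.mem_of_find?_eq_some hfind
    have hwMv : (pvCnt arr (String.ofList (w.toList.take 2)) : Int) = M := beq_iff_eq.mp hwM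
    rw [Option.bind_some, pv_w_find arr M w hwmem hw2' hwMv, Option.map_some]
    dsimp only
    rw [pv_B_min arr w hw2']

-- ===== VERDICT (by name: the statement is the Claim_ definition above) =====
theorem findMostCommonPrefix_spec : Claim_equal_findMostCommonPrefix := by
  intro arr _ hpre
  exact pv_main arr hpre
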